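-- pv_equiv track=rewrite | github.com/LittleEndu/Codeforces | Python/Unsorted/50a.py | get_max_dominoes
-- ===== SOURCE A (Python) =====
-- def get_max_dominoes(n,m):
--     if n==1 and m==1:
--         return 0
--     if m==2:
--         return n
--     if n==2:
--         return m
--     if m>n:
--         return n + get_max_dominoes(n,m-2)
--     return m + get_max_dominoes(n-2,m)
-- ===== SOURCE B (Python) =====
-- def get_max_dominoes(n, m):
--     return (n * m) // 2
-- ===== Notes on version B (the rewrite author's own statement) =====
-- stated objective: faster
-- what changed: Replaces A's two-variable recursion (peeling rows/columns of 2) by the closed form (n*m)//2.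
import Mathlib
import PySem

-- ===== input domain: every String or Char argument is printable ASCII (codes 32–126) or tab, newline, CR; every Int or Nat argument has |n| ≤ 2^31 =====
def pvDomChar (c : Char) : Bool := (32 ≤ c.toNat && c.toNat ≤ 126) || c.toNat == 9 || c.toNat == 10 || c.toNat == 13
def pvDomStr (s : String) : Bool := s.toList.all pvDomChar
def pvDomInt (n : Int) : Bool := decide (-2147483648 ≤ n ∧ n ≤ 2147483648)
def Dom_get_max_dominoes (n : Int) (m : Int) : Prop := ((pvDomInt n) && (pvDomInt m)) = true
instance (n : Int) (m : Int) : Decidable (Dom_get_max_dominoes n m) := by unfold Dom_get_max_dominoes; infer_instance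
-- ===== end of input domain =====

-- B replaces A's recursion by the closed form (n*m)//2 (O(1) instead of O(n+m)).

-- ===== PORT A =====
-- A's recursion step for step; the fuel argument only makes the recursion total in Lean
-- (on every input admitted by Pre_ the fuel is never exhausted, so the guard value 0 is never used).
def get_max_dominoes_fuel (fuel : Nat) (n : Int) (m : Int) : Int :=
  match fuel with
  | 0 => 0
  | fuel + 1 =>
    if n = 1 ∧ m = 1 then 0
    else if m = 2 then n
    else if n = 2 then m
    else if m > n then n + get_max_dominoes_fuel fuel n (m - 2)
    else m + get_max_dominoes_fuel fuel (n - 2) m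

def get_max_dominoes (n : Int) (m : Int) : Int :=
  get_max_dominoes_fuel (n.natAbs + m.natAbs + 1) n m

-- ===== PORT B =====
def get_max_dominoes_alt (n : Int) (m : Int) : Int :=
  PySem.Int.floordiv (n * m) 2

-- ===== PRECONDITION & SPEC =====
-- Pre_ admits exactly the inputs on which A's recursion terminates; outside it A
-- raises RecursionError (it never reaches a base case there).
def Pre_get_max_dominoes (n : Int) (m : Int) : Prop :=
  (1 ≤ n ∧ 1 ≤ m) ∨ (n ≤ 0 ∧ 2 ≤ m ∧ m % 2 = 0) ∨ (m ≤ 0 ∧ 2 ≤ n ∧ n % 2 = 0)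
instance (n : Int) (m : Int) : Decidable (Pre_get_max_dominoes n m) := by
  unfold Pre_get_max_dominoes; infer_instance

def pvWitness_get_max_dominoes : Int × Int := (3, 5)

def Spec_get_max_dominoes (n : Int) (m : Int) (out : Int) : Prop := out = get_max_dominoes_alt n m
instance (n : Int) (m : Int) (out : Int) : Decidable (Spec_get_max_dominoes n m out) := by
  unfold Spec_get_max_dominoes; infer_instance

-- ===== CLAIM (what is proved, stated in full; the proofs are below) =====
def Claim_equal_get_max_dominoes : Prop := ∀ (n : Int) (m : Int), Dom_get_max_dominoes n m → Pre_get_max_dominoes n m → Spec_get_max_dominoes n m (get_max_dominoes n m)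

-- ===== LEMMAS AND PROOFS =====
lemma fdiv_step (n m : Int) :
    PySem.Int.floordiv (n * m) 2 = n + PySem.Int.floordiv (n * (m - 2)) 2 := by
  have h : n * m = n * (m - 2) + n * 2 := by ring
  rw [h]
  simp [PySem.Int.floordiv, Int.add_mul_fdiv_right _ _ (by norm_num : (2:Int) ≠ 0)]
  ring

lemma getA_fuel_eq (fuel : Nat) :
    ∀ (n m : Int), 1 ≤ n → 1 ≤ m → (n + m).toNat ≤ fuel →
      get_max_dominoes_fuel fuel n m = PySem.Int.floordiv (n * m) 2 := by
  induction fuel with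
  | zero =>
    intro n m hn hm hf
    exfalso; omega
  | succ f ih =>
    intro n m hn hm hf
    unfold get_max_dominoes_fuel
    by_cases h11 : n = 1 ∧ m = 1
    · simp [h11.1, h11.2]
    · simp only [if_neg h11]
      by_cases hm2 : m = 2
      · subst hm2
        simp [PySem.Int.floordiv, Int.mul_fdiv_cancel _ (by norm_num : (2:Int) ≠ 0)]
      · simp only [if_neg hm2]
        by_cases hn2 : n = 2
        · subst hn2
          simp [PySem.Int.floordiv, mul_comm (2:Int),
            Int.mul_fdiv_cancel _ (by norm_num : (2:Int) ≠ 0)]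
        · simp only [if_neg hn2]
          by_cases hmn : m > n
          · -- here m ≥ 3, so m - 2 ≥ 1
            rw [if_pos hmn, ih n (m - 2) hn (by omega) (by omega), ← fdiv_step]
          · -- here m ≤ n and n ≥ 3, so n - 2 ≥ 1
            rw [if_neg hmn, ih (n - 2) m (by omega) hm (by omega)]
            have h := fdiv_step m n
            rw [mul_comm n m, h, mul_comm m (n - 2)]

-- region n ≤ 0, m even ≥ 2: the m > n branch fires until m = 2
lemma getA_fuel_eq_left (fuel : Nat) :
    ∀ (n m : Int), n ≤ 0 → 2 ≤ m → m % 2 = 0 → m.toNat ≤ fuel →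
      get_max_dominoes_fuel fuel n m = PySem.Int.floordiv (n * m) 2 := by
  induction fuel with
  | zero => intro n m hn hm _ hf; exfalso; omega
  | succ f ih =>
    intro n m hn hm hev hf
    unfold get_max_dominoes_fuel
    have h11 : ¬ (n = 1 ∧ m = 1) := by omega
    have hn2 : n ≠ 2 := by omega
    simp only [if_neg h11]
    by_cases hm2 : m = 2
    · subst hm2
      simp [PySem.Int.floordiv, Int.mul_fdiv_cancel _ (by norm_num : (2:Int) ≠ 0)]
    · have hmn : m > n := by omega
      rw [if_neg hm2, if_neg hn2, if_pos hmn,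
        ih n (m - 2) hn (by omega) (by omega) (by omega), ← fdiv_step]

-- region m ≤ 0, n even ≥ 2: the n - 2 branch fires until n = 2
lemma getA_fuel_eq_right (fuel : Nat) :
    ∀ (n m : Int), m ≤ 0 → 2 ≤ n → n % 2 = 0 → n.toNat ≤ fuel →
      get_max_dominoes_fuel fuel n m = PySem.Int.floordiv (n * m) 2 := by
  induction fuel with
  | zero => intro n m hm hn _ hf; exfalso; omega
  | succ f ih =>
    intro n m hm hn hev hf
    unfold get_max_dominoes_fuel
    have h11 : ¬ (n = 1 ∧ m = 1) := by omega
    have hm2 : m ≠ 2 := by omega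
    simp only [if_neg h11]
    by_cases hn2 : n = 2
    · subst hn2
      rw [if_neg hm2]
      simp [PySem.Int.floordiv, mul_comm (2:Int),
        Int.mul_fdiv_cancel _ (by norm_num : (2:Int) ≠ 0)]
    · have hmn : ¬ m > n := by omega
      rw [if_neg hm2, if_neg hn2, if_neg hmn,
        ih (n - 2) m hm (by omega) (by omega) (by omega)]
      have h := fdiv_step m n
      rw [mul_comm n m, h, mul_comm m (n - 2)]

-- ===== VERDICT (by name: the statement is the Claim_ definition above) =====
theorem get_max_dominoes_spec : Claim_equal_get_max_dominoes := by
  intro n m _ hpre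
  unfold Spec_get_max_dominoes get_max_dominoes get_max_dominoes_alt
  rcases hpre with ⟨hn, hm⟩ | ⟨hn, hm, hev⟩ | ⟨hm, hn, hev⟩
  · exact getA_fuel_eq _ n m hn hm (by omega)
  · exact getA_fuel_eq_left _ n m hn hm hev (by omega)
  · exact getA_fuel_eq_right _ n m hm hn hev (by omega)
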